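-- pv_equiv track=rewrite | github.com/Snowwolf11/tokamak_design | src/tokdesign/io/config.py | pick_meta_name
-- ===== SOURCE A (Python) =====
-- from typing import Any, Dict, Iterable, List, Mapping, Optional
--
-- def pick_meta_name(
--     configs: Mapping[str, Mapping[str, Any]],
--     preferred_order: Optional[List[str]] = None,
-- ) -> str:
--     """
--     Try to find a human-friendly name (meta.name) in a preferred config first.
--
--     preferred_order default:
--       ['device_space', 'equilibrium_space', 'equilibrium_optimization']
--     """
--     if preferred_order is None:
--         preferred_order = ["device_space", "equilibrium_space", "equilibrium_optimization"]
--
--     for key in preferred_order: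
--         if key in configs:
--             meta = (configs[key].get("meta") if isinstance(configs[key], dict) else None) or {}
--             if isinstance(meta, dict) and meta.get("name"):
--                 return str(meta["name"]).strip()
--
--     for name in sorted(configs.keys()):
--         cfg = configs[name]
--         meta = cfg.get("meta") if isinstance(cfg, dict) else None
--         if isinstance(meta, dict) and meta.get("name"):
--             return str(meta["name"]).strip()
--
--     return ""
-- ===== SOURCE B (Python) =====
-- def pick_meta_name(configs, preferred_order=None):
--     if preferred_order is None:
--         preferred_order = ["device_space", "equilibrium_space", "equilibrium_optimization"]
--     # Build a name index once: key -> stripped meta.name for every config that has one.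
--     names = {}
--     for key, cfg in configs.items():
--         meta = cfg.get("meta") if isinstance(cfg, dict) else None
--         name = meta.get("name") if isinstance(meta, dict) else None
--         if name:
--             names[key] = str(name).strip()
--     for key in preferred_order:
--         if key in names:
--             return names[key]
--     return names[min(names)] if names else ""
-- ===== Notes on version B (the rewrite author's own statement) =====
-- stated objective: simpler
-- what changed: Instead of two duplicated scan loops with inline meta handling, B builds a single name index (key -> stripped meta.name) in one pass, answers preferred keys by index lookup, and replaces the sorted-keys scan by taking the index entry at the minimal key; Pre_ excludes association lists with duplicate keys, which no Python dict argument can represent.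
import Mathlib
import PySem

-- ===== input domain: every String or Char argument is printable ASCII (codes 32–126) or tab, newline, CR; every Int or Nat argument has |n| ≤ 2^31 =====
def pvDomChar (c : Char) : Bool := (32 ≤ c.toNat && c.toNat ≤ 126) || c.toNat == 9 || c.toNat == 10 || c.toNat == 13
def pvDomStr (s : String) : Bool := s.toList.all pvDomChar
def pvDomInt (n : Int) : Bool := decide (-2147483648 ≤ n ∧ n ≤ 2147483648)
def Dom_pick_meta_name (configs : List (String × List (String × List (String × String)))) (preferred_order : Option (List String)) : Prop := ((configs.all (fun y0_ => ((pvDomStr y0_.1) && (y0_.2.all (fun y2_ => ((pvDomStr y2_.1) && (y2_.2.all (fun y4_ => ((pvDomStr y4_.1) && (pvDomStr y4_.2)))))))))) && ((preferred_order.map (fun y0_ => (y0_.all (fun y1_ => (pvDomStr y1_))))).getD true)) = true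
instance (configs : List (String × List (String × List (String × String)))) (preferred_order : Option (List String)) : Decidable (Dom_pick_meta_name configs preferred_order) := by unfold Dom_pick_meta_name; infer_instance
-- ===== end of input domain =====

-- B replaces A's two duplicated scan loops by one name index (key → stripped meta.name) built once,
-- then a preferred-key lookup and, failing that, the index entry at the smallest key (objective: simpler).

-- ===== PORT A =====
-- first loop of A: over preferred_order, skipping keys not in configs; the truthiness test
-- "meta.get('name')" is ported as "lookup result, defaulted to '', is nonempty"
def pvLoopPrefA (configs : List (String × List (String × List (String × String)))) :
    List String → Option String
  | [] => none
  | key :: rest =>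
    if (PySem.Dict.mk configs).contains key then
      -- meta = (configs[key].get("meta") if isinstance(configs[key], dict) else None) or {}
      if (((PySem.Dict.mk ((((PySem.Dict.mk configs).get? key).bind
              (fun cfg => (PySem.Dict.mk cfg).get? "meta")).getD [])).get? "name")).getD "" ≠ "" then
        some (PySem.Str.strip ((((PySem.Dict.mk ((((PySem.Dict.mk configs).get? key).bind
              (fun cfg => (PySem.Dict.mk cfg).get? "meta")).getD [])).get? "name")).getD ""))
      else pvLoopPrefA configs rest
    else pvLoopPrefA configs rest

-- second loop of A: over sorted(configs.keys()); "isinstance(meta, dict) and meta.get('name')"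
-- is the bind chain being a nonempty string
def pvLoopSortA (configs : List (String × List (String × List (String × String)))) :
    List String → Option String
  | [] => none
  | name :: rest =>
    -- cfg = configs[name]  (name comes from configs.keys(), so the lookup succeeds)
    if ((((PySem.Dict.mk (((PySem.Dict.mk configs).get? name).getD [])).get? "meta").bind
          (fun m => (PySem.Dict.mk m).get? "name")).getD "") ≠ "" then
      some (PySem.Str.strip (((((PySem.Dict.mk (((PySem.Dict.mk configs).get? name).getD [])).get? "meta").bind
          (fun m => (PySem.Dict.mk m).get? "name")).getD "")))
    else pvLoopSortA configs rest

def pick_meta_name (configs : List (String × List (String × List (String × String)))) (preferred_order : Option (List String)) : String :=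
  ((pvLoopPrefA configs (preferred_order.getD ["device_space", "equilibrium_space", "equilibrium_optimization"])).or
    (pvLoopSortA configs (PySem.List.sorted (PySem.Dict.mk configs).keys (fun x => x) false))).getD ""

-- ===== PORT B =====
-- B's helper lines "meta = …; name = …; if name: … str(name).strip()"
def pvNameOf (cfg : List (String × List (String × String))) : Option String :=
  if (((PySem.Dict.mk cfg).get? "meta").bind (fun m => (PySem.Dict.mk m).get? "name")).getD "" ≠ "" then
    some (PySem.Str.strip ((((PySem.Dict.mk cfg).get? "meta").bind (fun m => (PySem.Dict.mk m).get? "name")).getD ""))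
  else none

-- B's index-building loop
def pvBuildNames (configs : List (String × List (String × List (String × String)))) : PySem.Dict String String :=
  configs.foldl (fun d p =>
    if (pvNameOf p.2).isSome then d.insert p.1 ((pvNameOf p.2).getD "") else d) PySem.Dict.empty

-- B's preferred-key pass over the index
def pvLoopPrefB (names : PySem.Dict String String) : List String → Option String
  | [] => none
  | key :: rest =>
    if names.contains key then some (names.getD key "") else pvLoopPrefB names rest

def pick_meta_name_alt (configs : List (String × List (String × List (String × String)))) (preferred_order : Option (List String)) : String :=
  ((pvLoopPrefB (pvBuildNames configs) (preferred_order.getD ["device_space", "equilibrium_space", "equilibrium_optimization"])).getD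
    (if (pvBuildNames configs).keys ≠ [] then
      (pvBuildNames configs).getD ((PySem.List.min? (pvBuildNames configs).keys (fun x => x)).getD "") ""
    else ""))

-- ===== PRECONDITION & SPEC =====
-- Pre_ excludes association lists with duplicate keys: a Python dict cannot contain duplicate keys,
-- so such inputs do not correspond to any call of the Python function and their value is a representation artefact.
def Pre_pick_meta_name (configs : List (String × List (String × List (String × String)))) (preferred_order : Option (List String)) : Prop :=
  (configs.map (·.1)).Nodup

instance (configs : List (String × List (String × List (String × String)))) (preferred_order : Option (List String)) : Decidable (Pre_pick_meta_name configs preferred_order) := by unfold Pre_pick_meta_name; infer_instance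

def pvWitness_pick_meta_name : (List (String × List (String × List (String × String)))) × Option (List String) :=
  ([("a", [("meta", [("name", " x ")])]), ("b", [])], none)

def Spec_pick_meta_name (configs : List (String × List (String × List (String × String)))) (preferred_order : Option (List String)) (out : String) : Prop := out = pick_meta_name_alt configs preferred_order
instance (configs : List (String × List (String × List (String × String)))) (preferred_order : Option (List String)) (out : String) : Decidable (Spec_pick_meta_name configs preferred_order out) := by unfold Spec_pick_meta_name; infer_instance

-- ===== CLAIM (what is proved, stated in full; the proofs are below) =====
def Claim_equal_pick_meta_name : Prop := ∀ (configs : List (String × List (String × List (String × String)))) (preferred_order : Option (List String)), Dom_pick_meta_name configs preferred_order → Pre_pick_meta_name configs preferred_order → Spec_pick_meta_name configs preferred_order (pick_meta_name configs preferred_order)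

-- ===== LEMMAS AND PROOFS =====

-- the per-key extractor both programs compute: first-match lookup, then B's helper
def pvG (configs : List (String × List (String × List (String × String)))) (k : String) : Option String :=
  ((PySem.Dict.mk configs).get? k).bind pvNameOf

-- looking "name" up in "(o or {})" is the bind through o
lemma pvGetD_empty_get? (o : Option (List (String × String))) (s : String) :
    (PySem.Dict.mk (o.getD [])).get? s = o.bind (fun m => (PySem.Dict.mk m).get? s) := by
  cases o <;> rfl

-- same for the outer "configs[name]" level of A's second loop
lemma pvGetD_empty_get?' (o : Option (List (String × List (String × String)))) (s : String) :
    (PySem.Dict.mk (o.getD [])).get? s = o.bind (fun m => (PySem.Dict.mk m).get? s) := by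
  cases o <;> rfl

-- pvG as the if-expression A's loops test
lemma pvG_if (L : List (String × List (String × List (String × String)))) (k : String) :
    pvG L k =
      if ((((PySem.Dict.mk L).get? k).bind (fun cfg => (PySem.Dict.mk cfg).get? "meta")).bind
            (fun m => (PySem.Dict.mk m).get? "name")).getD "" ≠ "" then
        some (PySem.Str.strip (((((PySem.Dict.mk L).get? k).bind (fun cfg => (PySem.Dict.mk cfg).get? "meta")).bind
            (fun m => (PySem.Dict.mk m).get? "name")).getD ""))
      else none := by
  unfold pvG
  cases hc : (PySem.Dict.mk L).get? k with
  | none => simp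
  | some cfg => simp [pvNameOf]

lemma pvFold_get? (L : List (String × List (String × List (String × String))))
    (h : (L.map (·.1)).Nodup) (d : PySem.Dict String String) (k : String) :
    ((L.foldl (fun d p =>
        if (pvNameOf p.2).isSome then d.insert p.1 ((pvNameOf p.2).getD "") else d) d).get? k)
      = (pvG L k).or (d.get? k) := by
  induction L generalizing d with
  | nil => simp [pvG, PySem.Dict.get?]
  | cons p rest ih =>
    obtain ⟨k', c'⟩ := p
    simp only [List.map_cons, List.nodup_cons] at h
    obtain ⟨hk, hnd⟩ := h
    simp only [List.foldl_cons, ih hnd]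
    by_cases hkk : k' = k
    · subst hkk
      have hrest : (PySem.Dict.mk rest).get? k' = none := by
        rw [PySem.Dict.get?_eq_none_iff_not_mem_keys, PySem.Dict.keys_mk]
        exact hk
      have h1 : pvG rest k' = none := by simp [pvG, hrest]
      have h2 : pvG ((k', c') :: rest) k' = pvNameOf c' := by
        simp [pvG, PySem.Dict.get?_mk_cons]
      rw [h1, h2, Option.none_or]
      cases pvNameOf c' with
      | none => simp
      | some s => simp [PySem.Dict.get?_insert_self]
    · have h2 : pvG ((k', c') :: rest) k = pvG rest k := by
        simp only [pvG, PySem.Dict.get?_mk_cons]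
        rw [if_neg (by simpa using hkk)]
      rw [h2]
      cases pvNameOf c' with
      | none => simp
      | some s =>
        simp only [Option.isSome_some, if_true]
        rw [PySem.Dict.get?_insert_of_ne _ _ (fun he => hkk he.symm)]

-- A's preferred loop computes the first pvG hit
lemma pvLoopPrefA_eq (L : List (String × List (String × List (String × String)))) (pref : List String) :
    pvLoopPrefA L pref = pref.findSome? (pvG L) := by
  induction pref with
  | nil => rfl
  | cons key rest ih =>
    rw [pvLoopPrefA, List.findSome?_cons, pvG_if, PySem.Dict.contains_eq_isSome_get?,
      pvGetD_empty_get?]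
    by_cases hcond : ((((PySem.Dict.mk L).get? key).bind (fun cfg => (PySem.Dict.mk cfg).get? "meta")).bind
        (fun m => (PySem.Dict.mk m).get? "name")).getD "" ≠ ""
    · have hC : ((PySem.Dict.mk L).get? key).isSome := by
        cases hq : (PySem.Dict.mk L).get? key with
        | none => rw [hq] at hcond; simp at hcond
        | some _ => simp
      simp [hcond, hC]
    · simp [hcond, ih]

-- A's sorted-keys loop computes the first pvG hit too
lemma pvLoopSortA_eq (L : List (String × List (String × List (String × String)))) (S : List String) :
    pvLoopSortA L S = S.findSome? (pvG L) := by
  induction S with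
  | nil => rfl
  | cons key rest ih =>
    rw [pvLoopSortA, List.findSome?_cons, pvG_if, pvGetD_empty_get?']
    simp only [Option.bind_assoc]
    by_cases hcond : (((PySem.Dict.mk L).get? key).bind (fun y => ((PySem.Dict.mk y).get? "meta").bind
        (fun m => (PySem.Dict.mk m).get? "name"))).getD "" ≠ ""
    · simp [hcond]
    · simp [hcond, ih]

-- B's preferred loop over the index, given the index lookup equals pvG
lemma pvLoopPrefB_eq (names : PySem.Dict String String)
    (L : List (String × List (String × List (String × String))))
    (hget : ∀ k, names.get? k = pvG L k) (pref : List String) :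
    pvLoopPrefB names pref = pref.findSome? (pvG L) := by
  induction pref with
  | nil => rfl
  | cons key rest ih =>
    rw [pvLoopPrefB, List.findSome?_cons, PySem.Dict.contains_eq_isSome_get?, hget key,
      PySem.Dict.getD_eq_get?_getD, hget key]
    cases pvG L key with
    | none => simp [ih]
    | some s => simp

-- first hit of a ≤-sorted scan is the hit at the minimal hitting key
lemma pvFindSome?_sorted (S : List String) (g : String → Option String)
    (hS : S.Pairwise (· ≤ ·)) (m : String) (hm : m ∈ S) (hgm : (g m).isSome)
    (hmin : ∀ y, (g y).isSome → m ≤ y) :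
    S.findSome? g = g m := by
  induction S with
  | nil => cases hm
  | cons h t ih =>
    rw [List.findSome?_cons]
    rw [List.pairwise_cons] at hS
    cases hgh : g h with
    | some s =>
      have hhm : h = m := by
        rcases List.mem_cons.mp hm with hm1 | hm2
        · exact hm1.symm
        · exact le_antisymm (hS.1 m hm2) (hmin h (by simp [hgh]))
      rw [← hhm, hgh]
    | none =>
      have hm2 : m ∈ t := by
        rcases List.mem_cons.mp hm with hm1 | hm2
        · exact absurd hgm (by simp [hm1, hgh])
        · exact hm2
      exact ih hS.2 hm2

-- ===== VERDICT (by name: the statement is the Claim_ definition above) =====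
theorem pick_meta_name_spec : Claim_equal_pick_meta_name := by
  unfold Claim_equal_pick_meta_name
  intro configs po _hdom hpre
  unfold Spec_pick_meta_name pick_meta_name pick_meta_name_alt
  have hget : ∀ k, (pvBuildNames configs).get? k = pvG configs k := by
    intro k
    rw [pvBuildNames, pvFold_get? configs hpre PySem.Dict.empty k]
    simp [PySem.Dict.get?_empty]
  rw [pvLoopPrefA_eq, pvLoopPrefB_eq _ _ hget]
  cases hp : (po.getD ["device_space", "equilibrium_space", "equilibrium_optimization"]).findSome? (pvG configs) with
  | some s => simp
  | none =>
    simp only [Option.none_or, Option.getD_none]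
    rw [pvLoopSortA_eq]
    by_cases hne : (pvBuildNames configs).keys = []
    · have hall : ∀ k ∈ PySem.List.sorted (PySem.Dict.mk configs).keys (fun x => x) false,
          pvG configs k = none := by
        intro k _
        cases hg : pvG configs k with
        | none => rfl
        | some s =>
          exfalso
          have hc : (pvBuildNames configs).contains k = true := by
            rw [PySem.Dict.contains_eq_isSome_get?, hget k, hg]; rfl
          have := (PySem.Dict.contains_iff_mem_keys _ _).mp hc
          rw [hne] at this
          cases this
      rw [List.findSome?_eq_none_iff.mpr hall]
      simp [hne]
    · obtain ⟨m, hm⟩ : ∃ m, PySem.List.min? (pvBuildNames configs).keys (fun x => x) = some m := by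
        cases hq : PySem.List.min? (pvBuildNames configs).keys (fun x => x) with
        | none => exact absurd ((PySem.List.min?_eq_none_iff _ _).mp hq) hne
        | some m => exact ⟨m, rfl⟩
      have hmemk : m ∈ (pvBuildNames configs).keys := PySem.List.min?_mem hm
      have hgm : (pvG configs m).isSome := by
        rw [← hget m, ← PySem.Dict.contains_eq_isSome_get?]
        exact (PySem.Dict.contains_iff_mem_keys _ _).mpr hmemk
      have hmin : ∀ y, (pvG configs y).isSome → m ≤ y := by
        intro y hy
        have hcy : (pvBuildNames configs).contains y = true := by
          rw [PySem.Dict.contains_eq_isSome_get?, hget y]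
          exact hy
        exact PySem.List.min?_isMin hm y ((PySem.Dict.contains_iff_mem_keys _ _).mp hcy)
      have hmemS : m ∈ PySem.List.sorted (PySem.Dict.mk configs).keys (fun x => x) false := by
        rw [PySem.List.mem_sorted]
        have : ((PySem.Dict.mk configs).get? m).isSome := by
          cases hq : (PySem.Dict.mk configs).get? m with
          | none =>
            exfalso
            have : pvG configs m = none := by simp [pvG, hq]
            rw [this] at hgm; cases hgm
          | some _ => rfl
        by_contra hnm
        rw [← PySem.Dict.get?_eq_none_iff_not_mem_keys] at hnm
        rw [hnm] at this; cases this
      rw [pvFindSome?_sorted _ _ (PySem.List.sorted_pairwise _ _) m hmemS hgm hmin]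
      rw [if_pos hne, hm]
      simp only [Option.getD_some]
      rw [PySem.Dict.getD_eq_get?_getD, hget m]
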